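-- pv_equiv track=rewrite | github.com/henrytxz/ctci6 | codefights/sept_marathon/normalize_pwd.py | passwordNormalization
-- ===== SOURCE A (Python) =====
-- import string
--
-- def is_number(c):
--     numbers = [str(i) for i in range(10)]
--     return c in numbers
--
-- def is_letter(c):
--     return c in string.ascii_lowercase or c in string.ascii_uppercase
--
-- def passwordNormalization(password):
--     pw = password
--     numbers = []
--     letters = []
--     other = []
--     for c in pw:
--         if is_letter(c):
--             letters.append(c)
--         elif is_number(c):
--             numbers.append(c)
--         else:
--             other.append(c)
--     return ''.join(letters+numbers+other)
-- ===== SOURCE B (Python) =====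
-- import string
--
-- def classify(c):
--     if c in string.ascii_lowercase or c in string.ascii_uppercase:
--         return 0
--     if c in "0123456789":
--         return 1
--     return 2
--
-- def passwordNormalization(password):
--     return ''.join(sorted(password, key=classify))
-- ===== Notes on version B (the rewrite author's own statement) =====
-- stated objective: idiomatic
-- what changed: Replaces the three-bucket accumulation loop with a single stable sort by a 3-way category key (letter=0, digit=1, other=2), relying on sort stability to keep the original within-category order.
import Mathlib
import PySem

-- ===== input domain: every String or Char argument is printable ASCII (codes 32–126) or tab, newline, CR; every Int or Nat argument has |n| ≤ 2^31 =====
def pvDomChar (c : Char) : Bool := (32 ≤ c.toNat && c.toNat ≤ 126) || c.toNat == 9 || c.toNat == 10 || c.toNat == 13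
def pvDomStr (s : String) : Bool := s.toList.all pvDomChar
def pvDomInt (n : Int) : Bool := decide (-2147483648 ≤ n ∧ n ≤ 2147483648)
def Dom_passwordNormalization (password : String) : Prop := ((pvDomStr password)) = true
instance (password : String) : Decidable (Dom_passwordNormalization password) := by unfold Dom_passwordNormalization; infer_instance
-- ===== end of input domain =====

-- ===== PORT A =====
-- B replaces A's three-bucket accumulation loop with one stable sort by a 3-way category key (idiomatic; same result by stability).
-- 'c in <string>' for the one-char loop variable c is exact as membership of the char among the string's characters.
def pnIsLetter (c : Char) : Bool :=
  "abcdefghijklmnopqrstuvwxyz".toList.contains c || "ABCDEFGHIJKLMNOPQRSTUVWXYZ".toList.contains c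

-- numbers = [str(i) for i in range(10)]; c in numbers  (membership of the one-char string in that list)
def pnIsNumber (c : Char) : Bool :=
  ((PySem.List.pyRange 0 10 1).map PySem.Int.toStr).contains (String.ofList [c])

-- the loop, carried as the state (numbers, letters, other)
def pnLoop (cs : List Char) : List Char × List Char × List Char :=
  cs.foldl
    (fun (acc : List Char × List Char × List Char) c =>
      if pnIsLetter c then (acc.1, acc.2.1 ++ [c], acc.2.2)
      else if pnIsNumber c then (acc.1 ++ [c], acc.2.1, acc.2.2)
      else (acc.1, acc.2.1, acc.2.2 ++ [c]))
    ([], [], [])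

def passwordNormalization (password : String) : String :=
  String.ofList ((pnLoop password.toList).2.1 ++ (pnLoop password.toList).1 ++ (pnLoop password.toList).2.2)

-- ===== PORT B =====
def pnClassify (c : Char) : Int :=
  if "abcdefghijklmnopqrstuvwxyz".toList.contains c || "ABCDEFGHIJKLMNOPQRSTUVWXYZ".toList.contains c then 0
  else if "0123456789".toList.contains c then 1
  else 2

def passwordNormalization_alt (password : String) : String :=
  String.ofList (PySem.List.sorted password.toList pnClassify false)

-- ===== PRECONDITION & SPEC =====
def Spec_passwordNormalization (password : String) (out : String) : Prop := out = passwordNormalization_alt password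
instance (password : String) (out : String) : Decidable (Spec_passwordNormalization password out) := by unfold Spec_passwordNormalization; infer_instance

-- ===== CLAIM (what is proved, stated in full; the proofs are below) =====
def Claim_equal_passwordNormalization : Prop := ∀ (password : String), Dom_passwordNormalization password → Spec_passwordNormalization password (passwordNormalization password)

-- ===== LEMMAS AND PROOFS =====


theorem pnOfListInj (a b : List Char) : String.ofList a = String.ofList b ↔ a = b := by
  constructor
  · intro h; have := congrArg String.toList h; simpa using this
  · intro h; rw [h]

theorem pnEqLit (c : Char) (s : String) : String.ofList [c] = s ↔ [c] = s.toList := by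
  conv_lhs => rw [← String.ofList_toList (s := s)]
  exact pnOfListInj _ _

theorem pnIsNumber_eq (c : Char) : pnIsNumber c = "0123456789".toList.contains c := by
  have h : (PySem.List.pyRange 0 10 1).map PySem.Int.toStr
      = ["0","1","2","3","4","5","6","7","8","9"] := by decide
  rw [Bool.eq_iff_iff]
  unfold pnIsNumber
  rw [h]
  simp [pnEqLit]

theorem pnClassify_eq (c : Char) :
    pnClassify c = if pnIsLetter c then 0 else if pnIsNumber c then 1 else 2 := by
  rw [pnIsNumber_eq]; rfl

theorem pnClassify_zero (c : Char) : (pnClassify c == 0) = pnIsLetter c := by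
  rw [pnClassify_eq]; split_ifs with h1 h2 <;> simp_all

theorem pnClassify_one (c : Char) : (pnClassify c == 1) = (!pnIsLetter c && pnIsNumber c) := by
  rw [pnClassify_eq]; split_ifs with h1 h2 <;> simp_all

theorem pnClassify_two (c : Char) : (pnClassify c == 2) = (!pnIsLetter c && !pnIsNumber c) := by
  rw [pnClassify_eq]; split_ifs with h1 h2 <;> simp_all

theorem pnClassify_cases (c : Char) : pnClassify c = 0 ∨ pnClassify c = 1 ∨ pnClassify c = 2 := by
  rw [pnClassify_eq]; split_ifs <;> simp

theorem pnInsSkip {α : Type} (before : α → α → Bool) (x : α) (l1 l2 : List α)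
    (h : ∀ y ∈ l1, before x y = false) :
    PySem.List.insertBy before x (l1 ++ l2) = l1 ++ PySem.List.insertBy before x l2 := by
  induction l1 with
  | nil => simp
  | cons y t ih =>
      simp only [List.cons_append, PySem.List.insertBy, h y (by simp)]
      simp only [Bool.false_eq_true, if_false, List.cons.injEq, true_and]
      exact ih (fun z hz => h z (by simp [hz]))

theorem pnInsFront {α : Type} (before : α → α → Bool) (x : α) (l : List α)
    (h : ∀ y ∈ l, before x y = true) :
    PySem.List.insertBy before x l = x :: l := by
  cases l with
  | nil => rfl
  | cons y t => simp [PySem.List.insertBy, h y (by simp)]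

theorem pnSortInv (cs : List Char) : ∀ (f0 f1 f2 : List Char),
    (∀ a ∈ f0, pnClassify a = 0) → (∀ a ∈ f1, pnClassify a = 1) → (∀ a ∈ f2, pnClassify a = 2) →
    cs.foldl (fun acc x => PySem.List.insertBy (fun a b => decide (pnClassify a < pnClassify b)) x acc)
      (f0 ++ f1 ++ f2)
    = (f0 ++ cs.filter (fun c => pnClassify c == 0))
      ++ (f1 ++ cs.filter (fun c => pnClassify c == 1))
      ++ (f2 ++ cs.filter (fun c => pnClassify c == 2)) := by
  induction cs with
  | nil => intro f0 f1 f2 _ _ _; simp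
  | cons x cs ih =>
      intro f0 f1 f2 h0 h1 h2
      simp only [List.foldl_cons]
      rcases pnClassify_cases x with hx | hx | hx
      · have step : PySem.List.insertBy (fun a b => decide (pnClassify a < pnClassify b)) x (f0 ++ f1 ++ f2)
            = (f0 ++ [x]) ++ f1 ++ f2 := by
          rw [List.append_assoc,
            pnInsSkip _ _ f0 (f1 ++ f2) (fun y hy => by simp [hx, h0 y hy]),
            pnInsFront _ _ (f1 ++ f2) (fun y hy => by
              rcases List.mem_append.mp hy with hy | hy
              · simp [hx, h1 y hy]
              · simp [hx, h2 y hy])]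
          simp
        rw [step, ih (f0 ++ [x]) f1 f2
          (by intro a ha; rcases List.mem_append.mp ha with ha | ha
              · exact h0 a ha
              · simp at ha; subst ha; exact hx) h1 h2]
        simp [hx, List.append_assoc]
      · have step : PySem.List.insertBy (fun a b => decide (pnClassify a < pnClassify b)) x (f0 ++ f1 ++ f2)
            = f0 ++ (f1 ++ [x]) ++ f2 := by
          rw [pnInsSkip _ _ (f0 ++ f1) f2 (fun y hy => by
              rcases List.mem_append.mp hy with hy | hy
              · simp [hx, h0 y hy]
              · simp [hx, h1 y hy]),
            pnInsFront _ _ f2 (fun y hy => by simp [hx, h2 y hy])]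
          simp
        rw [step, ih f0 (f1 ++ [x]) f2 h0
          (by intro a ha; rcases List.mem_append.mp ha with ha | ha
              · exact h1 a ha
              · simp at ha; subst ha; exact hx) h2]
        simp [hx, List.append_assoc]
      · have step : PySem.List.insertBy (fun a b => decide (pnClassify a < pnClassify b)) x (f0 ++ f1 ++ f2)
            = f0 ++ f1 ++ (f2 ++ [x]) := by
          rw [List.append_assoc, pnInsSkip _ _ f0 (f1 ++ f2) (fun y hy => by simp [hx, h0 y hy]),
            pnInsSkip _ _ f1 f2 (fun y hy => by simp [hx, h1 y hy]),
            PySem.List.insertBy_of_forall_not_before _ _ f2 (fun y hy => by simp [hx, h2 y hy])]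
          simp
        rw [step, ih f0 f1 (f2 ++ [x]) h0 h1
          (by intro a ha; rcases List.mem_append.mp ha with ha | ha
              · exact h2 a ha
              · simp at ha; subst ha; exact hx)]
        simp [hx, List.append_assoc]

theorem pnSortCor (cs : List Char) :
    cs.foldl (fun acc x => PySem.List.insertBy (fun a b => decide (pnClassify a < pnClassify b)) x acc) []
    = cs.filter (fun c => pnClassify c == 0) ++ cs.filter (fun c => pnClassify c == 1)
      ++ cs.filter (fun c => pnClassify c == 2) := by
  simpa using pnSortInv cs [] [] [] (by simp) (by simp) (by simp)

theorem pnLoopInv (cs : List Char) : ∀ (N L O : List Char),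
    cs.foldl
      (fun (acc : List Char × List Char × List Char) c =>
        if pnIsLetter c then (acc.1, acc.2.1 ++ [c], acc.2.2)
        else if pnIsNumber c then (acc.1 ++ [c], acc.2.1, acc.2.2)
        else (acc.1, acc.2.1, acc.2.2 ++ [c]))
      (N, L, O)
    = (N ++ cs.filter (fun c => !pnIsLetter c && pnIsNumber c),
       L ++ cs.filter pnIsLetter,
       O ++ cs.filter (fun c => !pnIsLetter c && !pnIsNumber c)) := by
  induction cs with
  | nil => intro N L O; simp
  | cons x cs ih =>
      intro N L O
      simp only [List.foldl_cons]
      by_cases hl : pnIsLetter x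
      · simp [hl, ih, List.append_assoc]
      · by_cases hn : pnIsNumber x
        · simp [hl, hn, ih, List.append_assoc]
        · simp [hl, hn, ih, List.append_assoc]

-- ===== VERDICT (by name: the statement is the Claim_ definition above) =====
theorem passwordNormalization_spec : Claim_equal_passwordNormalization := by
  intro password _
  show passwordNormalization password = passwordNormalization_alt password
  unfold passwordNormalization passwordNormalization_alt pnLoop
  rw [PySem.List.sorted_eq_foldl_insertBy, pnSortCor password.toList,
      pnLoopInv password.toList [] [] []]
  simp only [List.nil_append]
  rw [List.filter_congr (fun c _ => (pnClassify_zero c)),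
      List.filter_congr (fun c _ => (pnClassify_one c)),
      List.filter_congr (fun c _ => (pnClassify_two c))]
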